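-- pv_equiv track=rewrite | github.com/Dima-Kazarin/pythonLab | lab8V1.py | find_max_duplicate
-- ===== SOURCE A (Python) =====
-- def find_max_duplicate(mat):
--     flat_matrix = []
--     for i in mat:
--         for j in i:
--             flat_matrix.append(j)
--
--     counts = {}
--
--     for i in flat_matrix:
--         counts[i] = counts.get(i, 0) + 1
--
--     duplicate = max([i for i, j in counts.items() if j > 1])
--     return duplicate
-- ===== SOURCE B (Python) =====
-- def find_max_duplicate(mat):
--     seen = set()
--     dups = set()
--     for row in mat:
--         for x in row:
--             if x in seen:
--                 dups.add(x)
--             else: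
--                 seen.add(x)
--     return max(dups)
-- ===== Notes on version B (the rewrite author's own statement) =====
-- stated objective: simpler
-- what changed: Replaces A's three phases (flatten into a list, build a count dict, filter-then-max the keys with count>1) with a single pass over the rows maintaining two sets (seen/dups) and a final max(dups); no flattened copy, no counts, no filtering pass.
import Mathlib
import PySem

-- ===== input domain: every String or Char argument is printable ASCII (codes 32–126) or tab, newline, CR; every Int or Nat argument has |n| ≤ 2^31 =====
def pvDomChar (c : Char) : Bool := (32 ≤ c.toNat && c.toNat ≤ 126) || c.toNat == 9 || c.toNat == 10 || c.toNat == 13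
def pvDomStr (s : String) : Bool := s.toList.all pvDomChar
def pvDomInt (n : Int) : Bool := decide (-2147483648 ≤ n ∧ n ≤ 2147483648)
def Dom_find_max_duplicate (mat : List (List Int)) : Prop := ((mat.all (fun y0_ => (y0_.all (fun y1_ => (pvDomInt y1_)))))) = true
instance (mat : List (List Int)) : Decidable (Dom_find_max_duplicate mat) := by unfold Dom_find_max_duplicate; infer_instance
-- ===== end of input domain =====

-- B replaces A's three phases (flatten into a list, build a count dict, filter-then-max) with a
-- single pass over the rows maintaining two sets (seen/dups) and a final max; objective: simpler.

-- ===== PORT A =====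
def find_max_duplicate (mat : List (List Int)) : Int :=
  let flat_matrix := mat.foldl (fun acc i => i.foldl (fun acc j => acc ++ [j]) acc) []
  let counts := flat_matrix.foldl (fun (d : PySem.Dict Int Int) i => d.insert i (d.getD i 0 + 1)) PySem.Dict.empty
  let dups := (counts.items.filter (fun p => decide (1 < p.2))).map (fun p => p.1)
  -- Python's max([]) raises ValueError: Pre_ excludes that case, so the .getD 0 default is never used
  (PySem.List.max? dups (fun x => x)).getD 0

-- ===== PORT B =====
def find_max_duplicate_alt (mat : List (List Int)) : Int :=
  let st := mat.foldl (fun (p : PySem.Set Int × PySem.Set Int) row =>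
    row.foldl (fun (p : PySem.Set Int × PySem.Set Int) x =>
      if PySem.Set.contains p.1 x then (p.1, PySem.Set.add p.2 x) else (PySem.Set.add p.1 x, p.2)) p)
    (PySem.Set.empty, PySem.Set.empty)
  -- Python's max(dups) raises ValueError when dups is empty: Pre_ excludes that case
  (PySem.List.max? st.2 (fun x => x)).getD 0

-- ===== PRECONDITION & SPEC =====
-- Pre_ excludes exactly the matrices with no repeated value, on which Python's max of an empty
-- collection raises ValueError in both A and B.
def Pre_find_max_duplicate (mat : List (List Int)) : Prop :=
  ∃ x ∈ mat.flatten, 2 ≤ mat.flatten.count x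
instance (mat : List (List Int)) : Decidable (Pre_find_max_duplicate mat) := by
  unfold Pre_find_max_duplicate; infer_instance
def pvWitness_find_max_duplicate : List (List Int) := [[1, 2], [2]]

def Spec_find_max_duplicate (mat : List (List Int)) (out : Int) : Prop := out = find_max_duplicate_alt mat
instance (mat : List (List Int)) (out : Int) : Decidable (Spec_find_max_duplicate mat out) := by unfold Spec_find_max_duplicate; infer_instance

-- ===== CLAIM (what is proved, stated in full; the proofs are below) =====
def Claim_equal_find_max_duplicate : Prop := ∀ (mat : List (List Int)), Dom_find_max_duplicate mat → Pre_find_max_duplicate mat → Spec_find_max_duplicate mat (find_max_duplicate mat)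

-- ===== LEMMAS AND PROOFS =====

-- A's nested append loop builds List.flatten
lemma flatA_gen (mat : List (List Int)) (acc : List Int) :
    mat.foldl (fun acc i => i.foldl (fun acc j => acc ++ [j]) acc) acc = acc ++ mat.flatten := by
  induction mat generalizing acc with
  | nil => simp
  | cons r t ih =>
    simp only [List.foldl_cons, List.flatten_cons]
    rw [PySem.List.foldl_append_singleton r acc, ih, List.append_assoc]

lemma flatA_eq (mat : List (List Int)) :
    mat.foldl (fun acc i => i.foldl (fun acc j => acc ++ [j]) acc) [] = mat.flatten := by
  simpa using flatA_gen mat []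

-- membership in A's dups list: the values occurring at least twice in the flattened matrix
lemma memA (mat : List (List Int)) (x : Int) :
    x ∈ (((mat.flatten.foldl (fun (d : PySem.Dict Int Int) i => d.insert i (d.getD i 0 + 1))
        PySem.Dict.empty).items.filter (fun p => decide (1 < p.2))).map (fun p => p.1)) ↔
      x ∈ mat.flatten ∧ 2 ≤ mat.flatten.count x := by
  rw [PySem.Dict.foldl_insert_getD_add_one_eq_counter, PySem.Dict.items_counter]
  simp only [List.mem_map, List.mem_filter, decide_eq_true_eq, PySem.Set.mem_ofList]
  constructor
  · rintro ⟨⟨k, c⟩, ⟨⟨j, hj, hjk⟩, hgt⟩, rfl⟩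
    obtain ⟨rfl, rfl⟩ := Prod.mk.injEq .. ▸ hjk
    exact ⟨hj, by simp only at hgt ⊢; exact_mod_cast hgt⟩
  · rintro ⟨hm, hc⟩
    exact ⟨(x, (mat.flatten.count x : Int)), ⟨⟨x, hm, rfl⟩, by simp only; exact_mod_cast hc⟩, rfl⟩

-- invariant of B's one-pass seen/dups loop over a flat list
lemma memB_flat (l : List Int) (s d : PySem.Set Int) (x : Int) :
    x ∈ (l.foldl (fun (p : PySem.Set Int × PySem.Set Int) x =>
        if PySem.Set.contains p.1 x then (p.1, PySem.Set.add p.2 x) else (PySem.Set.add p.1 x, p.2)) (s, d)).2 ↔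
      x ∈ d ∨ (x ∈ s ∧ x ∈ l) ∨ 2 ≤ l.count x := by
  induction l generalizing s d with
  | nil => simp
  | cons a t ih =>
    by_cases ha : PySem.Set.contains s a
    · have hs : a ∈ s := by simpa [PySem.Set.contains] using ha
      simp only [List.foldl_cons, ha, if_pos, ih]
      by_cases hx : x = a
      · subst hx
        simp [PySem.Set.mem_add, hs]
      · simp [PySem.Set.mem_add, hx, Ne.symm hx]
    · have hs : a ∉ s := by simpa [PySem.Set.contains] using ha
      simp only [List.foldl_cons, ha, if_neg, Bool.false_eq_true, not_false_iff, ih]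
      by_cases hx : x = a
      · subst hx
        simp only [PySem.Set.mem_add, List.mem_cons, List.count_cons, BEq.rfl, if_pos, or_true,
          true_or, true_and]
        by_cases hd : x ∈ d
        · simp [hd]
        · simp [hd, hs, ← List.one_le_count_iff]
          omega
      · simp [PySem.Set.mem_add, hx, Ne.symm hx]

-- B's nested loop over the rows equals the same loop over the flattened list
lemma stB_eq (mat : List (List Int)) :
    mat.foldl (fun (p : PySem.Set Int × PySem.Set Int) row =>
      row.foldl (fun (p : PySem.Set Int × PySem.Set Int) x =>
        if PySem.Set.contains p.1 x then (p.1, PySem.Set.add p.2 x) else (PySem.Set.add p.1 x, p.2)) p)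
      (PySem.Set.empty, PySem.Set.empty)
    = mat.flatten.foldl (fun (p : PySem.Set Int × PySem.Set Int) x =>
        if PySem.Set.contains p.1 x then (p.1, PySem.Set.add p.2 x) else (PySem.Set.add p.1 x, p.2))
      (PySem.Set.empty, PySem.Set.empty) := by
  rw [List.foldl_flatten]

-- max (no key) of two membership-equal nonempty Int lists agree
lemma max_eq_of_mem_iff (xs ys : List Int) (h : ∀ x, x ∈ xs ↔ x ∈ ys) (hne : xs ≠ []) :
    (PySem.List.max? xs (fun x => x)).getD 0 = (PySem.List.max? ys (fun x => x)).getD 0 := by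
  have hyne : ys ≠ [] := by
    intro hy; subst hy
    rcases List.exists_mem_of_ne_nil xs hne with ⟨a, ha⟩
    simpa using (h a).mp ha
  obtain ⟨m, hm⟩ : ∃ m, PySem.List.max? xs (fun x => x) = some m := by
    cases hmx : PySem.List.max? xs (fun x => x) with
    | none => exact absurd ((PySem.List.max?_eq_none_iff xs _).mp hmx) hne
    | some m => exact ⟨m, rfl⟩
  obtain ⟨m', hm'⟩ : ∃ m', PySem.List.max? ys (fun x => x) = some m' := by
    cases hmy : PySem.List.max? ys (fun x => x) with
    | none => exact absurd ((PySem.List.max?_eq_none_iff ys _).mp hmy) hyne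
    | some m => exact ⟨m, rfl⟩
  rw [hm, hm']
  have h1 : m ≤ m' := PySem.List.max?_isMax hm' m ((h m).mp (PySem.List.max?_mem hm))
  have h2 : m' ≤ m := PySem.List.max?_isMax hm m' ((h m').mpr (PySem.List.max?_mem hm'))
  simpa using le_antisymm h1 h2

-- ===== VERDICT (by name: the statement is the Claim_ definition above) =====
theorem find_max_duplicate_spec : Claim_equal_find_max_duplicate := by
  intro mat _ hpre
  unfold Spec_find_max_duplicate find_max_duplicate find_max_duplicate_alt
  rw [flatA_eq, stB_eq]
  apply max_eq_of_mem_iff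
  · intro x
    rw [memA, memB_flat]
    simp only [PySem.Set.empty, List.not_mem_nil, false_or, false_and]
    constructor
    · rintro ⟨-, h⟩; exact h
    · intro h; exact ⟨List.count_pos_iff.mp (by omega), h⟩
  · rcases hpre with ⟨x, hx, hc⟩
    intro hnil
    exact absurd ((memA mat x).mpr ⟨hx, hc⟩) (by simp [hnil])
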